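-- pv_equiv track=rewrite | github.com/Bloodmallet/bloodytools | bloodytools/utils/utils.py | tokenize_str
-- ===== SOURCE A (Python) =====
-- def tokenize_str(string: str) -> str:
--     """Return SimulationCraft appropriate name.
--
--     Arguments:
--       string {str} -- E.g. "Tawnos, Urza's Apprentice"
--
--     Returns:
--       str -- "tawnos_urzas_apprentice"
--     """
--
--     string = string.lower().split(" (")[0]
--     # cleanse name
--     if (
--         "__" in string
--         or " " in string
--         or "-" in string
--         or "'" in string
--         or "," in string
--     ):
--         return tokenize_str(
--             string.replace("'", "")
--             .replace("-", "")
--             .replace(" ", "_")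
--             .replace("__", "_")
--             .replace(",", "")
--         )
--
--     return string
-- ===== SOURCE B (Python) =====
-- def tokenize_str(string: str) -> str:
--     """Return SimulationCraft appropriate name (one-pass rewrite)."""
--     s = string.lower()
--     cut = s.find(" (")
--     if cut != -1:
--         s = s[:cut]
--     out = []
--     prev_us = False
--     for ch in s:
--         if ch in "',-":
--             continue
--         if ch in " _":
--             if not prev_us:
--                 out.append("_")
--                 prev_us = True
--         else:
--             out.append(ch)
--             prev_us = False
--     return "".join(out)
-- ===== Notes on version B (the rewrite author's own statement) =====
-- stated objective: simpler
-- what changed: Replaces A's recursive fixpoint of repeated str.replace passes by a single left-to-right character walk that cuts at the first space-parenthesis separator, drops apostrophes, hyphens and commas, and emits one underscore per space/underscore run using a previous-was-underscore flag.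
import Mathlib
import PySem

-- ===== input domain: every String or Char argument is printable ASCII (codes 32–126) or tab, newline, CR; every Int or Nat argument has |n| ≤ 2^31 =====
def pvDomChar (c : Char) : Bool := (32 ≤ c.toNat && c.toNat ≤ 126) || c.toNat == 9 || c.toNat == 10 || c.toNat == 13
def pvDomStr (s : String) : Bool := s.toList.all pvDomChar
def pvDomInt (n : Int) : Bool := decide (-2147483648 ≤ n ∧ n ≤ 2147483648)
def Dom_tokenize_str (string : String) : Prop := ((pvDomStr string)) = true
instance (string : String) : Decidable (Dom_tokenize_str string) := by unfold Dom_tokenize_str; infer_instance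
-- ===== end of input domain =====

-- B replaces A's recursive fixpoint of repeated str.replace passes by a single character walk
-- with a previous-was-underscore flag (objective: simpler; same return value).

-- ===== PORT A =====
-- A's five-replace cleansing pass, literally
def tokPass (s : List Char) : List Char :=
  PySem.Chars.replace (PySem.Chars.replace (PySem.Chars.replace (PySem.Chars.replace
    (PySem.Chars.replace s ['\''] []) ['-'] []) [' '] ['_']) ['_', '_'] ['_']) [','] []

-- A's five-way `in` test, literally
def tokTrigger (s : List Char) : Bool :=
  PySem.Chars.isIn ['_', '_'] s || PySem.Chars.isIn [' '] s || PySem.Chars.isIn ['-'] s ||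
    PySem.Chars.isIn ['\''] s || PySem.Chars.isIn [','] s

-- A's recursion, with a fuel guard for totality only (the fuel passed below is never exhausted)
def tokGo : Nat → List Char → List Char
  | 0, s => s
  | fuel + 1, s =>
    let s1 := PySem.List.pyGetD (PySem.Chars.splitOn (PySem.Chars.lower s) [' ', '(']) 0 []
    if tokTrigger s1 then tokGo fuel (tokPass s1) else s1

def tokenize_str (string : String) : String :=
  String.ofList (tokGo (3 * string.toList.length + 1) string.toList)

-- ===== PORT B =====
-- B's loop body: skip ' , -, emit '_' once per space/underscore run, copy anything else
def tokStep (st : List Char × Bool) (ch : Char) : List Char × Bool :=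
  if ch == '\'' || ch == ',' || ch == '-' then st
  else if ch == ' ' || ch == '_' then
    (if st.2 then st else (st.1 ++ ['_'], true))
  else (st.1 ++ [ch], false)

def tokenize_str_alt (string : String) : String :=
  let s0 := PySem.Chars.lower string.toList
  let cut := PySem.Chars.find s0 [' ', '(']
  let s1 := if cut != -1 then PySem.Chars.slice s0 none (some cut) else s0
  String.ofList (List.foldl tokStep ([], false) s1).1

-- ===== PRECONDITION & SPEC =====
def Spec_tokenize_str (string : String) (out : String) : Prop := out = tokenize_str_alt string
instance (string : String) (out : String) : Decidable (Spec_tokenize_str string out) := by unfold Spec_tokenize_str; infer_instance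

-- ===== CLAIM (what is proved, stated in full; the proofs are below) =====
def Claim_equal_tokenize_str : Prop := ∀ (string : String), Dom_tokenize_str string → Spec_tokenize_str string (tokenize_str string)

-- ===== LEMMAS AND PROOFS =====

-- the prefix of l before the first occurrence of " (" (what split(" (")[0] keeps)
def tkPre : List Char → List Char
  | [] => []
  | c :: t => if [' ', '('].isPrefixOf (c :: t) then [] else c :: tkPre t

-- the canonical result: skip ' , -, collapse space/underscore runs to one '_' (flag = run open)
def tkCanon (f : Bool) : List Char → List Char
  | [] => []
  | c :: t =>
    if c = '\'' ∨ c = ',' ∨ c = '-' then tkCanon f t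
    else if c = ' ' ∨ c = '_' then (if f then tkCanon true t else '_' :: tkCanon true t)
    else c :: tkCanon false t

-- one left-to-right non-overlapping pass of replace("__", "_")
def tkDD : List Char → List Char
  | [] => []
  | [c] => [c]
  | c :: d :: t => if c = '_' ∧ d = '_' then '_' :: tkDD t else c :: tkDD (d :: t)

def tkDel (c : Char) (l : List Char) : List Char := l.flatMap (fun x => if x = c then [] else [x])
def tkSp (l : List Char) : List Char := l.flatMap (fun x => if x = ' ' then ['_'] else [x])

def tkMeasure (l : List Char) : Nat := 2 * l.length + l.count ' '

def tkLow (l : List Char) : Prop := ∀ c ∈ l, PySem.Chars.lowerChar c = c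

theorem lowerChar_idem (c : Char) : PySem.Chars.lowerChar (PySem.Chars.lowerChar c) = PySem.Chars.lowerChar c := by
  unfold PySem.Chars.lowerChar PySem.Chars.isupper
  by_cases h : ('A' ≤ c ∧ c ≤ 'Z')
  · have h65 : 65 ≤ c.toNat := by
      have := h.1; rw [Char.le_def, UInt32.le_iff_toNat_le] at this; simpa using this
    have h90 : c.toNat ≤ 90 := by
      have := h.2; rw [Char.le_def, UInt32.le_iff_toNat_le] at this; simpa using this
    have hv : (c.toNat + 32).isValidChar := by left; omega
    have ht : (Char.ofNat (c.toNat + 32)).toNat = c.toNat + 32 := by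
      have h3 := Char.toNat_ofNat (c.toNat + 32)
      rw [if_pos hv] at h3
      exact h3
    have hfalse : ¬ ('A' ≤ Char.ofNat (c.toNat + 32) ∧ Char.ofNat (c.toNat + 32) ≤ 'Z') := by
      rintro ⟨h1, h2⟩
      rw [Char.le_def, UInt32.le_iff_toNat_le] at h2
      have hz : ('Z').val.toNat = 90 := rfl
      have ht' : (Char.ofNat (c.toNat + 32)).val.toNat = c.toNat + 32 := ht
      omega
    simp [h, hfalse]
  · simp [h]

-- replace with a single-char pattern is a flatMap over the characters
theorem tk_replace_go_single (c : Char) (new : List Char) :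
    ∀ (fuel : Nat) (l acc : List Char), l.length ≤ fuel →
      PySem.Chars.replace.go [c] new fuel l acc
        = acc.reverse ++ l.flatMap (fun x => if x = c then new else [x]) := by
  intro fuel
  induction fuel with
  | zero =>
    intro l acc h
    have : l = [] := by simpa using h
    subst this
    simp [PySem.Chars.replace.go]
  | succ n ih =>
    intro l acc h
    cases l with
    | nil => simp [PySem.Chars.replace.go]
    | cons c' t =>
      rw [PySem.Chars.replace.go]
      by_cases hc : c' = c
      · subst hc
        have hp : [c'].isPrefixOf (c' :: t) = true := by simp [List.isPrefixOf]
        simp only [hp, if_true]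
        rw [ih _ _ (by simp at h ⊢; omega)]
        simp
      · have hp : [c].isPrefixOf (c' :: t) = false := by
          simp [List.isPrefixOf]
          exact fun h' => hc h'.symm
        simp only [hp, Bool.false_eq_true, if_false]
        rw [ih _ _ (by simp at h ⊢; omega)]
        simp [hc]

theorem tk_replace_del (s : List Char) (c : Char) : PySem.Chars.replace s [c] [] = tkDel c s := by
  unfold PySem.Chars.replace tkDel
  rw [tk_replace_go_single c [] s.length s [] le_rfl]
  simp

theorem tk_replace_sp (s : List Char) : PySem.Chars.replace s [' '] ['_'] = tkSp s := by
  unfold PySem.Chars.replace tkSp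
  rw [tk_replace_go_single ' ' ['_'] s.length s [] le_rfl]
  simp

theorem tk_replace_go_dd :
    ∀ (fuel : Nat) (l acc : List Char), l.length ≤ fuel →
      PySem.Chars.replace.go ['_', '_'] ['_'] fuel l acc = acc.reverse ++ tkDD l := by
  intro fuel
  induction fuel with
  | zero =>
    intro l acc h
    have : l = [] := by simpa using h
    subst this
    simp [PySem.Chars.replace.go, tkDD]
  | succ n ih =>
    intro l acc h
    cases l with
    | nil => simp [PySem.Chars.replace.go, tkDD]
    | cons c' t =>
      rw [PySem.Chars.replace.go]
      by_cases hp : ['_', '_'].isPrefixOf (c' :: t) = true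
      · obtain ⟨rfl, t', rfl⟩ : c' = '_' ∧ ∃ t', t = '_' :: t' := by
          cases t with
          | nil => simp [List.isPrefixOf] at hp
          | cons b t' =>
            simp [List.isPrefixOf] at hp
            exact ⟨hp.1.symm, t', by rw [← hp.2]⟩
        simp only [hp, if_true]
        rw [ih _ _ (by simp at h ⊢; omega)]
        simp [tkDD]
      · simp only [hp, Bool.false_eq_true, if_false]
        rw [ih _ _ (by simp at h ⊢; omega)]
        have hdd : tkDD (c' :: t) = c' :: tkDD t := by
          cases t with
          | nil => simp [tkDD]
          | cons b t' =>
            have hne : ¬ (c' = '_' ∧ b = '_') := by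
              rintro ⟨rfl, rfl⟩
              simp [List.isPrefixOf] at hp
            rw [tkDD, if_neg hne]
        rw [hdd]; simp

theorem tk_replace_dd (s : List Char) : PySem.Chars.replace s ['_', '_'] ['_'] = tkDD s := by
  unfold PySem.Chars.replace
  rw [tk_replace_go_dd s.length s [] le_rfl]
  simp

theorem tk_pass_eq (s : List Char) :
    tokPass s = tkDel ',' (tkDD (tkSp (tkDel '-' (tkDel '\'' s)))) := by
  unfold tokPass
  rw [tk_replace_del, tk_replace_del, tk_replace_sp, tk_replace_dd, tk_replace_del]

-- head of splitOn is the prefix before the first separator occurrence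
theorem tk_splitOn_go_head :
    ∀ (fuel : Nat) (l cur : List Char) (acc : List (List Char)), l.length < fuel →
      ∃ r, PySem.Chars.splitOn.go [' ', '('] fuel l cur acc
        = acc.reverse ++ (cur.reverse ++ tkPre l) :: r := by
  intro fuel
  induction fuel with
  | zero => intro l cur acc h; exact absurd h (Nat.not_lt_zero _)
  | succ n ih =>
    intro l cur acc h
    cases l with
    | nil =>
      refine ⟨[], ?_⟩
      simp [PySem.Chars.splitOn.go, tkPre]
    | cons c' t =>
      rw [PySem.Chars.splitOn.go]
      by_cases hp : [' ', '('].isPrefixOf (c' :: t) = true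
      · simp only [hp, if_true]
        obtain ⟨r, hr⟩ := ih ((c' :: t).drop ([' ', '('].length)) [] (cur.reverse :: acc)
          (by simp at h ⊢; omega)
        refine ⟨(([] : List Char).reverse ++ tkPre ((c' :: t).drop ([' ', '('].length))) :: r, ?_⟩
        rw [hr, tkPre, if_pos hp]
        simp
      · simp only [hp, Bool.false_eq_true, if_false]
        obtain ⟨r, hr⟩ := ih t (c' :: cur) acc (by simp at h ⊢; omega)
        refine ⟨r, ?_⟩
        rw [hr, tkPre, if_neg (by simp [hp])]
        simp

theorem tk_splitOn_head (l : List Char) :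
    PySem.List.pyGetD (PySem.Chars.splitOn l [' ', '(']) 0 [] = tkPre l := by
  unfold PySem.Chars.splitOn
  obtain ⟨r, hr⟩ := tk_splitOn_go_head (l.length + 1) l [] [] (by omega)
  rw [hr]
  simp [PySem.List.pyGetD_zero]

-- stepping tkCanon over a common head
theorem tk_canon_cong (c : Char) (x y : List Char) (hxy : ∀ f, tkCanon f x = tkCanon f y) (f : Bool) :
    tkCanon f (c :: x) = tkCanon f (c :: y) := by
  rw [tkCanon, tkCanon]
  split_ifs <;> simp [hxy]

theorem tk_canon_us (c : Char) (hc : c = ' ' ∨ c = '_') (g : Bool) (r : List Char) :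
    tkCanon g (c :: r) = if g then tkCanon true r else '_' :: tkCanon true r := by
  rw [tkCanon]
  rcases hc with rfl | rfl <;> simp

theorem tk_canon_del (c : Char) (hc : c = '\'' ∨ c = ',' ∨ c = '-') :
    ∀ (l : List Char) (f : Bool), tkCanon f (tkDel c l) = tkCanon f l := by
  intro l
  induction l with
  | nil => intro f; simp [tkDel]
  | cons x t ih =>
    intro f
    have hstep : tkDel c (x :: t) = (if x = c then [] else [x]) ++ tkDel c t := by
      simp [tkDel]
    rw [hstep]
    by_cases hx : x = c
    · subst hx
      have hskip : tkCanon f (x :: t) = tkCanon f t := by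
        rw [tkCanon, if_pos hc]
      rw [hskip, if_pos rfl, List.nil_append]
      exact ih f
    · rw [if_neg hx, List.singleton_append]
      exact tk_canon_cong x _ _ (fun f' => ih f') f

theorem tk_canon_sp : ∀ (l : List Char) (f : Bool), tkCanon f (tkSp l) = tkCanon f l := by
  intro l
  induction l with
  | nil => intro f; simp [tkSp]
  | cons x t ih =>
    intro f
    have hstep : tkSp (x :: t) = (if x = ' ' then ['_'] else [x]) ++ tkSp t := by
      simp [tkSp]
    rw [hstep]
    by_cases hx : x = ' '
    · subst hx
      rw [if_pos rfl, List.singleton_append]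
      rw [tk_canon_us '_' (by simp), tk_canon_us ' ' (by simp), ih true]
    · rw [if_neg hx, List.singleton_append]
      exact tk_canon_cong x _ _ (fun f' => ih f') f

theorem tk_canon_dd : ∀ (l : List Char) (f : Bool), tkCanon f (tkDD l) = tkCanon f l := by
  intro l
  induction l using tkDD.induct with
  | case1 => intro f; simp [tkDD]
  | case2 c => intro f; simp [tkDD]
  | case3 c d t hcd ih =>
    obtain ⟨rfl, rfl⟩ := hcd
    intro f
    rw [tkDD, if_pos ⟨rfl, rfl⟩]
    rw [tk_canon_us '_' (by simp), tk_canon_us '_' (by simp), tk_canon_us '_' (by simp), ih true]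
    split_ifs <;> simp_all
  | case4 c d t hcd ih =>
    rw [tkDD, if_neg hcd]
    intro f
    exact tk_canon_cong c _ _ (fun f' => ih f') f

theorem tk_canon_pass (s : List Char) (f : Bool) : tkCanon f (tokPass s) = tkCanon f s := by
  rw [tk_pass_eq]
  rw [tk_canon_del ',' (by simp), tk_canon_dd, tk_canon_sp, tk_canon_del '-' (by simp),
    tk_canon_del '\'' (by simp)]

theorem tk_singleton_infix (c : Char) (l : List Char) : [c] <:+: l ↔ c ∈ l := by
  constructor
  · intro h
    exact List.singleton_sublist.mp h.sublist
  · intro h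
    obtain ⟨u, v, rfl⟩ := List.append_of_mem h
    exact ⟨u, v, by simp⟩

theorem tk_canon_id :
    ∀ (l : List Char), ' ' ∉ l → '-' ∉ l → '\'' ∉ l → ',' ∉ l → ¬ (['_', '_'] <:+: l) →
      ∀ f : Bool, (f = true → l.head? ≠ some '_') → tkCanon f l = l := by
  intro l
  induction l with
  | nil => intro _ _ _ _ _ f _; simp [tkCanon]
  | cons c t ih =>
    intro h1 h2 h3 h4 h5 f hf
    have h1t : ' ' ∉ t := fun h => h1 (List.mem_cons_of_mem _ h)
    have h2t : '-' ∉ t := fun h => h2 (List.mem_cons_of_mem _ h)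
    have h3t : '\'' ∉ t := fun h => h3 (List.mem_cons_of_mem _ h)
    have h4t : ',' ∉ t := fun h => h4 (List.mem_cons_of_mem _ h)
    have h5t : ¬ (['_', '_'] <:+: t) := by
      intro h
      exact h5 (h.trans (List.suffix_cons c t).isInfix)
    have hcs : c ≠ ' ' := fun h => h1 (h ▸ List.mem_cons_self ..)
    have hcd : c ≠ '-' := fun h => h2 (h ▸ List.mem_cons_self ..)
    have hcq : c ≠ '\'' := fun h => h3 (h ▸ List.mem_cons_self ..)
    have hcc : c ≠ ',' := fun h => h4 (h ▸ List.mem_cons_self ..)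
    by_cases hcu : c = '_'
    · subst hcu
      have hfz : f = false := by
        cases f with
        | false => rfl
        | true => exact absurd rfl (by intro h; exact (hf h) rfl)
      subst hfz
      have hth : t.head? ≠ some '_' := by
        intro hh
        cases t with
        | nil => simp at hh
        | cons b t' =>
          simp at hh
          subst hh
          exact h5 ⟨[], t', by simp⟩
      rw [tk_canon_us '_' (by simp) false t]
      simp only [Bool.false_eq_true, if_false]
      rw [ih h1t h2t h3t h4t h5t true (fun _ => hth)]
    · rw [tkCanon, if_neg (by simp [hcq, hcc, hcd]), if_neg (by simp [hcs, hcu])]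
      rw [ih h1t h2t h3t h4t h5t false (by simp)]

theorem tk_mem_del {a c : Char} {l : List Char} (h : a ∈ l) (hne : a ≠ c) : a ∈ tkDel c l := by
  simp only [tkDel, List.mem_flatMap]
  exact ⟨a, h, by simp [hne]⟩

theorem tk_mem_sp {a : Char} {l : List Char} (h : a ∈ l) (hne : a ≠ ' ') : a ∈ tkSp l := by
  simp only [tkSp, List.mem_flatMap]
  exact ⟨a, h, by simp [hne]⟩

theorem tk_mem_dd {a : Char} {l : List Char} (h : a ∈ l) (hne : a ≠ '_') : a ∈ tkDD l := by
  induction l using tkDD.induct with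
  | case1 => simp at h
  | case2 c => simpa [tkDD] using h
  | case3 c d t hcd ih =>
    obtain ⟨rfl, rfl⟩ := hcd
    rw [tkDD, if_pos ⟨rfl, rfl⟩]
    rcases List.mem_cons.mp h with rfl | h'
    · exact absurd rfl hne
    · rcases List.mem_cons.mp h' with rfl | h''
      · exact absurd rfl hne
      · exact List.mem_cons_of_mem _ (ih h'')
  | case4 c d t hcd ih =>
    rw [tkDD, if_neg hcd]
    rcases List.mem_cons.mp h with rfl | h'
    · exact List.mem_cons_self ..
    · exact List.mem_cons_of_mem _ (ih h')

theorem tk_dd_sublist (l : List Char) : List.Sublist (tkDD l) l := by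
  induction l using tkDD.induct with
  | case1 => simp [tkDD]
  | case2 c => simp [tkDD]
  | case3 c d t h ih =>
    rw [tkDD, if_pos h]
    exact (ih.cons₂ '_').trans (by obtain ⟨rfl, rfl⟩ := h; exact (List.sublist_cons_self _ _).cons₂ _)
  | case4 c d t h ih =>
    rw [tkDD, if_neg h]
    exact ih.cons₂ c

theorem tk_dd_subset {a : Char} {l : List Char} (h : a ∈ tkDD l) : a ∈ l :=
  (tk_dd_sublist l).mem h

theorem tk_del_subset {a c : Char} {l : List Char} (h : a ∈ tkDel c l) : a ∈ l := by
  simp only [tkDel, List.mem_flatMap] at h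
  obtain ⟨x, hx, hmem⟩ := h
  by_cases hxc : x = c
  · simp [hxc] at hmem
  · simp [hxc] at hmem
    exact hmem ▸ hx

theorem tk_sp_mem {a : Char} {l : List Char} (h : a ∈ tkSp l) : a ∈ l ∨ a = '_' := by
  simp only [tkSp, List.mem_flatMap] at h
  obtain ⟨x, hx, hmem⟩ := h
  by_cases hxs : x = ' '
  · simp [hxs] at hmem
    exact Or.inr hmem
  · simp [hxs] at hmem
    exact Or.inl (hmem ▸ hx)

theorem tk_sp_no_space (l : List Char) : ' ' ∉ tkSp l := by
  intro h
  simp only [tkSp, List.mem_flatMap] at h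
  obtain ⟨x, hx, hmem⟩ := h
  by_cases hxs : x = ' '
  · simp [hxs] at hmem
  · simp [hxs] at hmem
    exact hxs hmem.symm

theorem tk_pre_subset {a : Char} {l : List Char} (h : a ∈ tkPre l) : a ∈ l := by
  induction l with
  | nil => simpa [tkPre] using h
  | cons c t ih =>
    rw [tkPre] at h
    split_ifs at h
    · simp at h
    · rcases List.mem_cons.mp h with rfl | h'
      · exact List.mem_cons_self ..
      · exact List.mem_cons_of_mem _ (ih h')

theorem tk_infix_del {c : Char} {l : List Char} (hc : c ≠ '_') (h : ['_', '_'] <:+: l) :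
    ['_', '_'] <:+: tkDel c l := by
  obtain ⟨u, v, rfl⟩ := h
  refine ⟨tkDel c u, tkDel c v, ?_⟩
  show tkDel c u ++ ['_', '_'] ++ tkDel c v = tkDel c (u ++ ['_', '_'] ++ v)
  simp only [tkDel, List.flatMap_append]
  have hne : ('_' : Char) ≠ c := Ne.symm hc
  simp [hne]

theorem tk_infix_sp {l : List Char} (h : ['_', '_'] <:+: l) : ['_', '_'] <:+: tkSp l := by
  obtain ⟨u, v, rfl⟩ := h
  refine ⟨tkSp u, tkSp v, ?_⟩
  show tkSp u ++ ['_', '_'] ++ tkSp v = tkSp (u ++ ['_', '_'] ++ v)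
  simp only [tkSp, List.flatMap_append]
  simp

theorem tk_del_step (c x : Char) (t : List Char) :
    tkDel c (x :: t) = (if x = c then [] else [x]) ++ tkDel c t := by
  simp [tkDel]

theorem tk_del_sublist (c : Char) (l : List Char) : List.Sublist (tkDel c l) l := by
  induction l with
  | nil => simp [tkDel]
  | cons x t ih =>
    rw [tk_del_step]
    by_cases hx : x = c
    · rw [if_pos hx, List.nil_append]
      exact ih.cons x
    · rw [if_neg hx, List.singleton_append]
      exact ih.cons₂ x

theorem tk_del_len_le (c : Char) (l : List Char) : (tkDel c l).length ≤ l.length :=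
  (tk_del_sublist c l).length_le

theorem tk_del_len_lt {c : Char} {l : List Char} (h : c ∈ l) : (tkDel c l).length < l.length := by
  induction l with
  | nil => simp at h
  | cons x t ih =>
    rw [tk_del_step, List.length_append, List.length_cons]
    by_cases hx : x = c
    · rw [if_pos hx, List.length_nil]
      have hle := tk_del_len_le c t
      omega
    · have hc : c ∈ t := by
        rcases List.mem_cons.mp h with rfl | h'
        · exact absurd rfl hx
        · exact h'
      rw [if_neg hx, List.length_singleton]
      have := ih hc
      omega

theorem tk_del_count_le (c a : Char) (l : List Char) : (tkDel c l).count a ≤ l.count a :=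
  (tk_del_sublist c l).count_le a

theorem tk_sp_step (x : Char) (t : List Char) :
    tkSp (x :: t) = (if x = ' ' then ['_'] else [x]) ++ tkSp t := by
  simp [tkSp]

theorem tk_sp_len (l : List Char) : (tkSp l).length = l.length := by
  induction l with
  | nil => simp [tkSp]
  | cons x t ih =>
    rw [tk_sp_step, List.length_append, List.length_cons]
    by_cases hx : x = ' '
    · rw [if_pos hx, List.length_singleton]
      omega
    · rw [if_neg hx, List.length_singleton]
      omega

theorem tk_sp_count_space (l : List Char) : (tkSp l).count ' ' = 0 :=
  List.count_eq_zero.mpr (tk_sp_no_space l)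

theorem tk_dd_len_lt {l : List Char} (h : ['_', '_'] <:+: l) : (tkDD l).length < l.length := by
  induction l using tkDD.induct with
  | case1 =>
    have := h.length_le
    simp at this
  | case2 c =>
    have := h.length_le
    simp at this
  | case3 c d t hcd ih =>
    rw [tkDD, if_pos hcd]
    have := (tk_dd_sublist t).length_le
    simp only [List.length_cons]
    omega
  | case4 c d t hcd ih =>
    rw [tkDD, if_neg hcd]
    have ht : ['_', '_'] <:+: (d :: t) := by
      obtain ⟨u, v, he⟩ := h
      cases u with
      | nil =>
        simp at he
        exact absurd ⟨he.1.symm, he.2.1.symm⟩ hcd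
      | cons b u' =>
        simp at he
        refine ⟨u', v, ?_⟩
        simpa using he.2
    have := ih ht
    simpa using Nat.succ_lt_succ this

theorem tk_measure_pass_lt (s : List Char) (h : tokTrigger s = true) :
    tkMeasure (tokPass s) < tkMeasure s := by
  have hdel : ∀ (c : Char) (l : List Char), tkMeasure (tkDel c l) ≤ tkMeasure l := by
    intro c l
    unfold tkMeasure
    have := tk_del_len_le c l
    have := tk_del_count_le c ' ' l
    omega
  have hdel_lt : ∀ (c : Char) (l : List Char), c ∈ l → tkMeasure (tkDel c l) < tkMeasure l := by
    intro c l hm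
    unfold tkMeasure
    have := tk_del_len_lt hm
    have := tk_del_count_le c ' ' l
    omega
  have hsp : ∀ l : List Char, tkMeasure (tkSp l) ≤ tkMeasure l := by
    intro l
    unfold tkMeasure
    have := tk_sp_len l
    have := tk_sp_count_space l
    omega
  have hsp_lt : ∀ l : List Char, ' ' ∈ l → tkMeasure (tkSp l) < tkMeasure l := by
    intro l hm
    unfold tkMeasure
    have h1 := tk_sp_len l
    have h2 := tk_sp_count_space l
    have h3 : l.count ' ' ≠ 0 := by
      intro h0
      exact (List.count_eq_zero.mp h0) hm
    omega
  have hdd : ∀ l : List Char, tkMeasure (tkDD l) ≤ tkMeasure l := by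
    intro l
    unfold tkMeasure
    have := (tk_dd_sublist l).length_le
    have := (tk_dd_sublist l).count_le ' '
    omega
  have hdd_lt : ∀ l : List Char, ['_', '_'] <:+: l → tkMeasure (tkDD l) < tkMeasure l := by
    intro l hm
    unfold tkMeasure
    have := tk_dd_len_lt hm
    have := (tk_dd_sublist l).count_le ' '
    omega
  rw [tk_pass_eq]
  unfold tokTrigger at h
  simp only [Bool.or_eq_true, PySem.Chars.isIn_iff_infix] at h
  rcases h with ((((h | h) | h) | h) | h)
  · have h1 : ['_', '_'] <:+: tkDel '\'' s := tk_infix_del (by simp) h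
    have h2 : ['_', '_'] <:+: tkDel '-' (tkDel '\'' s) := tk_infix_del (by simp) h1
    have h3 : ['_', '_'] <:+: tkSp (tkDel '-' (tkDel '\'' s)) := tk_infix_sp h2
    calc tkMeasure (tkDel ',' (tkDD (tkSp (tkDel '-' (tkDel '\'' s)))))
        ≤ tkMeasure (tkDD (tkSp (tkDel '-' (tkDel '\'' s)))) := hdel _ _
      _ < tkMeasure (tkSp (tkDel '-' (tkDel '\'' s))) := hdd_lt _ h3
      _ ≤ tkMeasure (tkDel '-' (tkDel '\'' s)) := hsp _
      _ ≤ tkMeasure (tkDel '\'' s) := hdel _ _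
      _ ≤ tkMeasure s := hdel _ _
  · have hm := (tk_singleton_infix ' ' s).mp h
    have h1 : ' ' ∈ tkDel '\'' s := tk_mem_del hm (by simp)
    have h2 : ' ' ∈ tkDel '-' (tkDel '\'' s) := tk_mem_del h1 (by simp)
    calc tkMeasure (tkDel ',' (tkDD (tkSp (tkDel '-' (tkDel '\'' s)))))
        ≤ tkMeasure (tkDD (tkSp (tkDel '-' (tkDel '\'' s)))) := hdel _ _
      _ ≤ tkMeasure (tkSp (tkDel '-' (tkDel '\'' s))) := hdd _
      _ < tkMeasure (tkDel '-' (tkDel '\'' s)) := hsp_lt _ h2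
      _ ≤ tkMeasure (tkDel '\'' s) := hdel _ _
      _ ≤ tkMeasure s := hdel _ _
  · have hm := (tk_singleton_infix '-' s).mp h
    have h1 : '-' ∈ tkDel '\'' s := tk_mem_del hm (by simp)
    calc tkMeasure (tkDel ',' (tkDD (tkSp (tkDel '-' (tkDel '\'' s)))))
        ≤ tkMeasure (tkDD (tkSp (tkDel '-' (tkDel '\'' s)))) := hdel _ _
      _ ≤ tkMeasure (tkSp (tkDel '-' (tkDel '\'' s))) := hdd _
      _ ≤ tkMeasure (tkDel '-' (tkDel '\'' s)) := hsp _
      _ < tkMeasure (tkDel '\'' s) := hdel_lt _ _ h1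
      _ ≤ tkMeasure s := hdel _ _
  · have hm := (tk_singleton_infix '\'' s).mp h
    calc tkMeasure (tkDel ',' (tkDD (tkSp (tkDel '-' (tkDel '\'' s)))))
        ≤ tkMeasure (tkDD (tkSp (tkDel '-' (tkDel '\'' s)))) := hdel _ _
      _ ≤ tkMeasure (tkSp (tkDel '-' (tkDel '\'' s))) := hdd _
      _ ≤ tkMeasure (tkDel '-' (tkDel '\'' s)) := hsp _
      _ ≤ tkMeasure (tkDel '\'' s) := hdel _ _
      _ < tkMeasure s := hdel_lt _ _ hm
  · have hm := (tk_singleton_infix ',' s).mp h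
    have h1 : ',' ∈ tkDel '\'' s := tk_mem_del hm (by simp)
    have h2 : ',' ∈ tkDel '-' (tkDel '\'' s) := tk_mem_del h1 (by simp)
    have h3 : ',' ∈ tkSp (tkDel '-' (tkDel '\'' s)) := tk_mem_sp h2 (by simp)
    have h4 : ',' ∈ tkDD (tkSp (tkDel '-' (tkDel '\'' s))) := tk_mem_dd h3 (by simp)
    calc tkMeasure (tkDel ',' (tkDD (tkSp (tkDel '-' (tkDel '\'' s)))))
        < tkMeasure (tkDD (tkSp (tkDel '-' (tkDel '\'' s)))) := hdel_lt _ _ h4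
      _ ≤ tkMeasure (tkSp (tkDel '-' (tkDel '\'' s))) := hdd _
      _ ≤ tkMeasure (tkDel '-' (tkDel '\'' s)) := hsp _
      _ ≤ tkMeasure (tkDel '\'' s) := hdel _ _
      _ ≤ tkMeasure s := hdel _ _

theorem tk_low_lower (s : List Char) : tkLow (PySem.Chars.lower s) := by
  intro c hc
  simp only [PySem.Chars.lower, List.mem_map] at hc
  obtain ⟨a, _, rfl⟩ := hc
  exact lowerChar_idem a

theorem tk_low_eq {l : List Char} (h : tkLow l) : PySem.Chars.lower l = l := by
  unfold PySem.Chars.lower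
  exact (List.map_congr_left h).trans (List.map_id l)

theorem tk_low_pass {s : List Char} (h : tkLow s) : tkLow (tokPass s) := by
  intro c hc
  rw [tk_pass_eq] at hc
  have hc1 := tk_del_subset hc
  have hc2 := tk_dd_subset hc1
  rcases tk_sp_mem hc2 with hc3 | rfl
  · exact h c (tk_del_subset (tk_del_subset hc3))
  · decide

theorem tk_pass_no_space (s : List Char) : ' ' ∉ tokPass s := by
  intro hc
  rw [tk_pass_eq] at hc
  exact tk_sp_no_space _ (tk_dd_subset (tk_del_subset hc))

theorem tk_pre_no_space {l : List Char} (h : ' ' ∉ l) : tkPre l = l := by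
  induction l with
  | nil => rfl
  | cons c t ih =>
    have hcs : c ≠ ' ' := fun h' => h (h' ▸ List.mem_cons_self ..)
    rw [tkPre, if_neg (by simp [List.isPrefixOf]; intro h'; exact absurd h'.symm hcs)]
    rw [ih (fun h' => h (List.mem_cons_of_mem _ h'))]

theorem tk_pre_no_infix {l : List Char} (h : ¬ ([' ', '('] <:+: l)) : tkPre l = l := by
  induction l with
  | nil => rfl
  | cons c t ih =>
    have hnp : ¬ ([' ', '('].isPrefixOf (c :: t) = true) := by
      intro hp
      exact h (List.isPrefixOf_iff_prefix.mp hp).isInfix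
    rw [tkPre, if_neg hnp]
    rw [ih (fun h' => h (h'.trans (List.suffix_cons c t).isInfix))]

theorem tk_pre_take : ∀ (l : List Char) (k : Nat), [' ', '('] <+: l.drop k →
    (∀ i < k, ¬ [' ', '('] <+: l.drop i) → tkPre l = l.take k := by
  intro l
  induction l with
  | nil =>
    intro k h1 _
    simp at h1
  | cons c t ih =>
    intro k h1 h2
    cases k with
    | zero =>
      simp only [List.drop_zero] at h1
      rw [tkPre, if_pos (List.isPrefixOf_iff_prefix.mpr h1), List.take_zero]
    | succ k' =>
      have h0 : ¬ [' ', '('] <+: (c :: t) := by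
        have := h2 0 (by omega)
        simpa using this
      rw [tkPre, if_neg (fun hp => h0 (List.isPrefixOf_iff_prefix.mp hp))]
      rw [List.take_succ_cons]
      congr 1
      exact ih k' (by simpa using h1) (fun i hi => by
        have := h2 (i + 1) (by omega)
        simpa using this)

theorem tk_pre_len_le (l : List Char) : (tkPre l).length ≤ l.length := by
  induction l with
  | nil => simp [tkPre]
  | cons c t ih =>
    rw [tkPre]
    split_ifs
    · simp
    · simpa using Nat.succ_le_succ ih

theorem tk_b_cut (s0 : List Char) :
    (if (PySem.Chars.find s0 [' ', '('] != -1) = true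
      then PySem.Chars.slice s0 none (some (PySem.Chars.find s0 [' ', '('])) else s0) = tkPre s0 := by
  by_cases hf : PySem.Chars.find s0 [' ', '('] = -1
  · rw [if_neg (by simp [hf])]
    exact (tk_pre_no_infix (((PySem.Chars.find_eq_neg_one_iff _ _).mp hf))).symm
  · have h0 : 0 ≤ PySem.Chars.find s0 [' ', '('] := by
      have := PySem.Chars.neg_one_le_find s0 [' ', '(']
      omega
    obtain ⟨hpre, hmin⟩ := PySem.Chars.find_spec h0
    rw [if_pos (by simp [hf])]
    rw [PySem.Chars.slice_eq_listSlice, PySem.List.slice_to s0 h0]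
    exact (tk_pre_take s0 (PySem.Chars.find s0 [' ', '(']).toNat hpre (fun i hi => hmin i hi)).symm

theorem tk_fold_canon : ∀ (l acc : List Char) (f : Bool),
    (List.foldl tokStep (acc, f) l).1 = acc ++ tkCanon f l := by
  intro l
  induction l with
  | nil => intro acc f; simp [tkCanon]
  | cons x t ih =>
    intro acc f
    rw [List.foldl_cons]
    by_cases hskip : x = '\'' ∨ x = ',' ∨ x = '-'
    · have hstep : tokStep (acc, f) x = (acc, f) := by
        unfold tokStep
        rcases hskip with rfl | rfl | rfl <;> simp
      have hcanon : tkCanon f (x :: t) = tkCanon f t := by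
        rw [tkCanon, if_pos hskip]
      rw [hstep, hcanon, ih]
    · by_cases hsp : x = ' ' ∨ x = '_'
      · rw [tk_canon_us x hsp]
        have hb : (x == '\'' || x == ',' || x == '-') = false := by
          rcases hsp with rfl | rfl <;> simp
        have hb2 : (x == ' ' || x == '_') = true := by
          rcases hsp with rfl | rfl <;> simp
        cases f with
        | true =>
          have hstep : tokStep (acc, true) x = (acc, true) := by
            unfold tokStep
            simp [hb, hb2]
          rw [hstep, ih]
          simp
        | false =>
          have hstep : tokStep (acc, false) x = (acc ++ ['_'], true) := by
            unfold tokStep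
            simp [hb, hb2]
          rw [hstep, ih]
          simp
      · push_neg at hskip hsp
        have hb : (x == '\'' || x == ',' || x == '-') = false := by
          simp [hskip.1, hskip.2.1, hskip.2.2]
        have hb2 : (x == ' ' || x == '_') = false := by
          simp [hsp.1, hsp.2]
        have hstep : tokStep (acc, f) x = (acc ++ [x], false) := by
          unfold tokStep
          simp [hb, hb2]
        have hcanon : tkCanon f (x :: t) = x :: tkCanon false t := by
          rw [tkCanon, if_neg (by tauto), if_neg (by tauto)]
        rw [hstep, hcanon, ih]
        simp

theorem tk_main : ∀ (fuel : Nat) (s : List Char),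
    tkMeasure (tkPre (PySem.Chars.lower s)) < fuel →
      tokGo fuel s = tkCanon false (tkPre (PySem.Chars.lower s)) := by
  intro fuel
  induction fuel with
  | zero => intro s h; exact absurd h (Nat.not_lt_zero _)
  | succ n ih =>
    intro s h
    rw [tokGo]
    simp only [tk_splitOn_head]
    set s1 := tkPre (PySem.Chars.lower s) with hs1
    by_cases htr : tokTrigger s1 = true
    · rw [if_pos htr]
      have hlow1 : tkLow s1 := fun c hc => tk_low_lower s c (tk_pre_subset hc)
      have hlowu : tkLow (tokPass s1) := tk_low_pass hlow1
      have hue : tkPre (PySem.Chars.lower (tokPass s1)) = tokPass s1 := by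
        rw [tk_low_eq hlowu]
        exact tk_pre_no_space (tk_pass_no_space s1)
      have hm : tkMeasure (tkPre (PySem.Chars.lower (tokPass s1))) < n := by
        rw [hue]
        have := tk_measure_pass_lt s1 htr
        omega
      rw [ih (tokPass s1) hm, hue, tk_canon_pass]
    · rw [if_neg htr]
      unfold tokTrigger at htr
      simp only [Bool.or_eq_true, PySem.Chars.isIn_iff_infix, not_or] at htr
      obtain ⟨⟨⟨⟨hdd, hsp⟩, hdash⟩, hq⟩, hcm⟩ := htr
      exact (tk_canon_id s1
        (fun h' => hsp ((tk_singleton_infix ' ' s1).mpr h'))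
        (fun h' => hdash ((tk_singleton_infix '-' s1).mpr h'))
        (fun h' => hq ((tk_singleton_infix '\'' s1).mpr h'))
        (fun h' => hcm ((tk_singleton_infix ',' s1).mpr h'))
        hdd false (by simp)).symm

-- ===== VERDICT (by name: the statement is the Claim_ definition above) =====
theorem tokenize_str_spec : Claim_equal_tokenize_str := by
  intro s _
  unfold Spec_tokenize_str tokenize_str tokenize_str_alt
  dsimp only
  rw [tk_b_cut, tk_fold_canon, tk_main]
  · simp
  · have h1 : (tkPre (PySem.Chars.lower s.toList)).length ≤ s.toList.length := by
      have := tk_pre_len_le (PySem.Chars.lower s.toList)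
      simpa [PySem.Chars.lower] using this
    have h2 : (tkPre (PySem.Chars.lower s.toList)).count ' ' ≤ (tkPre (PySem.Chars.lower s.toList)).length :=
      List.count_le_length
    unfold tkMeasure
    omega
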